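-- pv_equiv track=rewrite | github.com/chadhogg/AdventOfCode | 2023/python/2023Day10.py | expandLines
-- ===== SOURCE A (Python) =====
-- def isValid(lines: list[str], loc: tuple[int, int]) -> bool:
--     return (loc[0] >= 0 and loc[0] < len(lines) and loc[1] >= 0 and loc[1] < len(lines[loc[0]]))
--
-- def get(lines: list[str], loc: tuple[int, int]) -> bool:
--     assert(isValid(lines, loc))
--     return lines[loc[0]][loc[1]]
--
-- def expandLines(lines: list[str], distances: list[list[int]]) -> list[str]:
--     expanded = [['.' for x in range(0, len(lines[0]) * 2 + 1)] for y in range(0, len(lines) * 2 + 1)]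
--     for row in range(0, len(lines)):
--         for col in range(0, len(lines[row])):
--             expanded[row * 2 + 1][col * 2 + 1] = lines[row][col]
--     for row in range(1, len(expanded), 2):
--         for col in range(2, len(expanded[row]) - 1, 2):
--             left = ((row - 1) // 2, (col - 1) // 2)
--             right = (row // 2, col // 2)
--             if distances[left[0]][left[1]] != -1 and (get(lines, left) == '-' or get(lines, left) == 'F' or get(lines, left) == 'L'):
--                 expanded[row][col] = '-'
--             if distances[right[0]][right[1]] != -1 and (get(lines, right) == '-' or get(lines, right) == 'J' or get(lines, right) == '7'):
--                 expanded[row][col] = '-'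
--     for row in range(2, len(expanded) - 1, 2):
--         for col in range(1, len(expanded[row]), 2):
--             up = ((row - 1) // 2, (col - 1) // 2)
--             down = (row // 2, col // 2)
--             if distances[up[0]][up[1]] != -1 and (get(lines, up) == '|' or get(lines, up) == 'F' or get(lines, up) == '7'):
--                 expanded[row][col] = '|'
--             if distances[down[0]][down[1]] != -1 and (get(lines, down) == '|' or get(lines, down) == 'J' or get(lines, down) == 'L'):
--                 expanded[row][col] = '|'
--     return [''.join(line) for line in expanded]
-- ===== SOURCE B (Python) =====
-- def expandLines(lines: list[str], distances: list[list[int]]) -> list[str]: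
--     H = len(lines)
--     dots = '.' * (2 * len(lines[0]) + 1)
--
--     def hconn(l, r, dl, dr):
--         return '-' if (dl != -1 and l in '-FL') or (dr != -1 and r in '-J7') else '.'
--
--     def vconn(u, d, du, dd):
--         return '|' if (du != -1 and u in '|F7') or (dd != -1 and d in '|JL') else '.'
--
--     def cell_row(row, drow):
--         out = '.'
--         for c in range(len(row)):
--             out += row[c]
--             out += hconn(row[c], row[c + 1], drow[c], drow[c + 1]) if c + 1 < len(row) else '.'
--         return out
--
--     def sep_row(up, down, dup, ddown):
--         return '.' + ''.join(vconn(up[c], down[c], dup[c], ddown[c]) + '.'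
--                              for c in range(len(down)))
--
--     out = [dots]
--     for r in range(H):
--         if r > 0:
--             out.append(sep_row(lines[r - 1], lines[r], distances[r - 1], distances[r]))
--         out.append(cell_row(lines[r], distances[r]))
--     out.append(dots)
--     return out
-- ===== Notes on version B (the rewrite author's own statement) =====
-- stated objective: alternative
-- what changed: Replaces A's preallocated (2H+1)x(2W+1) mutable grid updated by four passes (dot fill, cell copy, horizontal sweep, vertical sweep) with a streaming builder that never materialises a grid: it emits border dot rows, one cell row per input row (cells joined by horizontal connectors) and one separator row per adjacent pair of input rows, each connector computed once as a single disjunction instead of two sequential overwrites.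
-- outside the precondition, e.g. on expandLines(['.'], []): A returns ['...', '...', '...'], B raises IndexError
import Mathlib
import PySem

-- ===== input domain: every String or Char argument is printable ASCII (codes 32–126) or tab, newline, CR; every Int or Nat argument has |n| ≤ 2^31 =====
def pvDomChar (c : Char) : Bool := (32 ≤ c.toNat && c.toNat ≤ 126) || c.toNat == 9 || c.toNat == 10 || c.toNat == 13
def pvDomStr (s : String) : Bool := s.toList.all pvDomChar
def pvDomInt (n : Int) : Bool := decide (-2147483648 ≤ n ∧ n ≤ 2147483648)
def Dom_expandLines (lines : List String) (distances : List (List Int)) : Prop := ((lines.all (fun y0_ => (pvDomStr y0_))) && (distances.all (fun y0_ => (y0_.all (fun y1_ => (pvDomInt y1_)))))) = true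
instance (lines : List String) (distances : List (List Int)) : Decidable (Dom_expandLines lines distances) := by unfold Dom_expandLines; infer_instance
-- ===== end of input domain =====

-- B replaces A's four mutation passes over a preallocated doubled grid by a streaming
-- construction that never builds a mutable grid: it emits border dot rows, one cell row
-- per input row (cells joined by horizontal connectors) and one separator row per
-- adjacent input-row pair (vertical connectors), with each connector decided once as a
-- disjunction instead of two sequential overwrites (objective: alternative, same cost).

-- ===== PORT A =====
-- lines[r][c] (Python's get(lines, loc)); always in range under Pre_, where Python's assert holds
def pvGetL (lines : List String) (r c : Nat) : Char := ((lines.getD r "").toList).getD c ' '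
-- distances[r][c]; always in range under Pre_ (Python raises IndexError otherwise)
def pvGetD2 (distances : List (List Int)) (r c : Nat) : Int := (distances.getD r []).getD c 0
-- expanded[r][c] = ch; always in range under Pre_ (Python raises IndexError out of range)
def pvSet2 (g : List (List Char)) (r c : Nat) (ch : Char) : List (List Char) :=
  g.set r ((g.getD r []).set c ch)

-- expanded = [['.' for x in range(0, len(lines[0])*2+1)] for y in range(0, len(lines)*2+1)]
def pvInit (H W : Nat) : List (List Char) :=
  (List.range (H * 2 + 1)).map (fun _ => (List.range (W * 2 + 1)).map (fun _ => '.'))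

-- the first double loop: expanded[row*2+1][col*2+1] = lines[row][col]
def pvCopy (lines : List String) (g : List (List Char)) : List (List Char) :=
  (List.range lines.length).foldl (fun g row =>
    (List.range (lines.getD row "").toList.length).foldl (fun g col =>
      pvSet2 g (row * 2 + 1) (col * 2 + 1) (pvGetL lines row col)) g) g

-- second loop: 'for row in range(1, len(expanded), 2)' enumerated as row = i*2+1, i < len/2,
-- 'for col in range(2, len(expanded[row])-1, 2)' as col = j*2+2, j < (len-2)/2 (same index sets)
def pvHoriz (lines : List String) (distances : List (List Int)) (g : List (List Char)) : List (List Char) :=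
  (List.range (g.length / 2)).foldl (fun g i =>
    let row := i * 2 + 1
    (List.range (((g.getD row []).length - 2) / 2)).foldl (fun g j =>
      let col := j * 2 + 2
      let g1 := if pvGetD2 distances ((row - 1) / 2) ((col - 1) / 2) ≠ -1 ∧
                   (pvGetL lines ((row - 1) / 2) ((col - 1) / 2) = '-' ∨
                    pvGetL lines ((row - 1) / 2) ((col - 1) / 2) = 'F' ∨
                    pvGetL lines ((row - 1) / 2) ((col - 1) / 2) = 'L')
                then pvSet2 g row col '-' else g
      if pvGetD2 distances (row / 2) (col / 2) ≠ -1 ∧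
         (pvGetL lines (row / 2) (col / 2) = '-' ∨
          pvGetL lines (row / 2) (col / 2) = 'J' ∨
          pvGetL lines (row / 2) (col / 2) = '7')
      then pvSet2 g1 row col '-' else g1) g) g

-- third loop: 'for row in range(2, len(expanded)-1, 2)' as row = i*2+2, i < (len-2)/2,
-- 'for col in range(1, len(expanded[row]), 2)' as col = j*2+1, j < len/2
def pvVert (lines : List String) (distances : List (List Int)) (g : List (List Char)) : List (List Char) :=
  (List.range ((g.length - 2) / 2)).foldl (fun g i =>
    let row := i * 2 + 2
    (List.range ((g.getD row []).length / 2)).foldl (fun g j =>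
      let col := j * 2 + 1
      let g1 := if pvGetD2 distances ((row - 1) / 2) ((col - 1) / 2) ≠ -1 ∧
                   (pvGetL lines ((row - 1) / 2) ((col - 1) / 2) = '|' ∨
                    pvGetL lines ((row - 1) / 2) ((col - 1) / 2) = 'F' ∨
                    pvGetL lines ((row - 1) / 2) ((col - 1) / 2) = '7')
                then pvSet2 g row col '|' else g
      if pvGetD2 distances (row / 2) (col / 2) ≠ -1 ∧
         (pvGetL lines (row / 2) (col / 2) = '|' ∨
          pvGetL lines (row / 2) (col / 2) = 'J' ∨
          pvGetL lines (row / 2) (col / 2) = 'L')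
      then pvSet2 g1 row col '|' else g1) g) g

def expandLines (lines : List String) (distances : List (List Int)) : List String :=
  -- len(lines[0]) raises IndexError on lines = []; that input is excluded by Pre_
  let g0 := pvInit lines.length (lines.headD "").toList.length
  let g1 := pvCopy lines g0
  let g2 := pvHoriz lines distances g1
  let g3 := pvVert lines distances g2
  g3.map (fun line => String.ofList line)

-- ===== PORT B =====
-- Source B's hconn: the horizontal connector between two adjacent cells, one disjunction
def pvHconn (l r : Char) (dl dr : Int) : Char :=
  if (dl ≠ -1 ∧ l ∈ ['-', 'F', 'L']) ∨ (dr ≠ -1 ∧ r ∈ ['-', 'J', '7']) then '-' else '.'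

-- Source B's vconn: the vertical connector between two vertically adjacent cells
def pvVconn (u d : Char) (du dd : Int) : Char :=
  if (du ≠ -1 ∧ u ∈ ['|', 'F', '7']) ∨ (dd ≠ -1 ∧ d ∈ ['|', 'J', 'L']) then '|' else '.'

-- Source B's cell_row: '.' then, per cell, the cell and the connector to its right (or the border dot)
def pvCellRowB (row : List Char) (drow : List Int) : List Char :=
  (List.range row.length).foldl (fun out c =>
    out ++ [row.getD c ' ',
            if c + 1 < row.length then
              pvHconn (row.getD c ' ') (row.getD (c + 1) ' ') (drow.getD c 0) (drow.getD (c + 1) 0)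
            else '.']) ['.']

-- Source B's sep_row: '.' then, per column, the vertical connector and a dot
def pvSepRowB (up down : List Char) (dup ddown : List Int) : List Char :=
  ['.'] ++ (List.range down.length).flatMap (fun c =>
    [pvVconn (up.getD c ' ') (down.getD c ' ') (dup.getD c 0) (ddown.getD c 0), '.'])

def expandLines_alt (lines : List String) (distances : List (List Int)) : List String :=
  -- len(lines[0]) raises IndexError on lines = []; excluded by Pre_
  let dots := String.ofList (List.replicate (2 * (lines.headD "").toList.length + 1) '.')
  ((List.range lines.length).foldl (fun out r =>
      (if 0 < r then
         out ++ [String.ofList (pvSepRowB (lines.getD (r - 1) "").toList (lines.getD r "").toList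
                   (distances.getD (r - 1) []) (distances.getD r []))]
       else out) ++
      [String.ofList (pvCellRowB (lines.getD r "").toList (distances.getD r []))])
    [dots]) ++ [dots]

-- ===== PRECONDITION & SPEC =====
-- Pre_ = the natural domain: a nonempty rectangular grid with a distances table covering it.
-- It excludes malformed inputs (ragged grids, distance tables shorter than the grid) on which
-- A sometimes still returns — only because -1 entries short-circuit its reads or a 1×1/empty
-- grid skips its connector loops, an accident of its sweep order — while B, which reads each
-- row's distances once per emitted row, raises IndexError or pads differently there.
def Pre_expandLines (lines : List String) (distances : List (List Int)) : Prop :=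
  lines ≠ [] ∧
  (∀ l ∈ lines, l.toList.length = (lines.headD "").toList.length) ∧
  lines.length ≤ distances.length ∧
  (∀ d ∈ distances.take lines.length, (lines.headD "").toList.length ≤ d.length)
instance (lines : List String) (distances : List (List Int)) : Decidable (Pre_expandLines lines distances) := by unfold Pre_expandLines; infer_instance

def pvWitness_expandLines : List String × List (List Int) := (["F7", "LJ"], [[0, 0], [0, 0]])

def Spec_expandLines (lines : List String) (distances : List (List Int)) (out : List String) : Prop := out = expandLines_alt lines distances
instance (lines : List String) (distances : List (List Int)) (out : List String) : Decidable (Spec_expandLines lines distances out) := by unfold Spec_expandLines; infer_instance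

-- ===== CLAIM (what is proved, stated in full; the proofs are below) =====
def Claim_equal_expandLines : Prop := ∀ (lines : List String) (distances : List (List Int)), Dom_expandLines lines distances → Pre_expandLines lines distances → Spec_expandLines lines distances (expandLines lines distances)

-- ===== LEMMAS AND PROOFS =====

-- the common per-cell value both programs produce (proof-layer characterisation)
def pvCellB (lines : List String) (distances : List (List Int)) (H W r c : Nat) : Char :=
  if r % 2 = 1 ∧ c % 2 = 1 then pvGetL lines (r / 2) (c / 2)
  else if r % 2 = 1 ∧ c % 2 = 0 ∧ 0 < c ∧ c < 2 * W then
    if pvGetD2 distances (r / 2) (c / 2 - 1) ≠ -1 ∧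
       pvGetL lines (r / 2) (c / 2 - 1) ∈ ['-', 'F', 'L'] then '-'
    else if pvGetD2 distances (r / 2) (c / 2) ≠ -1 ∧
            pvGetL lines (r / 2) (c / 2) ∈ ['-', 'J', '7'] then '-'
    else '.'
  else if r % 2 = 0 ∧ 0 < r ∧ r < 2 * H ∧ c % 2 = 1 then
    if pvGetD2 distances (r / 2 - 1) (c / 2) ≠ -1 ∧
       pvGetL lines (r / 2 - 1) (c / 2) ∈ ['|', 'F', '7'] then '|'
    else if pvGetD2 distances (r / 2) (c / 2) ≠ -1 ∧
            pvGetL lines (r / 2) (c / 2) ∈ ['|', 'J', 'L'] then '|'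
    else '.'
  else '.'

def pvRrow (lines : List String) (distances : List (List Int)) (r : Nat) : String :=
  String.ofList ((List.range (2 * (lines.headD "").toList.length + 1)).map
    (fun c => pvCellB lines distances lines.length (lines.headD "").toList.length r c))

theorem pv_getD_set {α} (s : List α) (m c : Nat) (x : α) (d : α) :
    (s.set m x).getD c d = if m = c ∧ m < s.length then x else s.getD c d := by
  simp only [List.getD_eq_getElem?_getD, List.getElem?_set]
  split_ifs with h1 h2 h2 <;> simp_all <;> omega

theorem pv_set_getD_self {α} (s : List α) (R : Nat) (d : α) : s.set R (s.getD R d) = s := by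
  by_cases h : R < s.length
  · rw [List.getD_eq_getElem s d h]; exact List.set_getElem_self h
  · exact List.set_eq_of_length_le (by omega)

def pvUpd {α} (d : α) (a n : Nat) (T : Nat → α → α) (s0 : List α) : List α :=
  (List.range n).foldl (fun s i => s.set (i * 2 + a) (T i (s.getD (i * 2 + a) d))) s0

theorem pvUpd_succ {α} (d : α) (a n : Nat) (T : Nat → α → α) (s0 : List α) :
    pvUpd d a (n + 1) T s0
    = (pvUpd d a n T s0).set (n * 2 + a) (T n ((pvUpd d a n T s0).getD (n * 2 + a) d)) := by
  unfold pvUpd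
  rw [List.range_succ, List.foldl_append, List.foldl_cons, List.foldl_nil]

theorem pvUpd_len {α} (d : α) (a n : Nat) (T : Nat → α → α) (s0 : List α) :
    (pvUpd d a n T s0).length = s0.length := by
  induction n with
  | zero => simp [pvUpd]
  | succ n ih => rw [pvUpd_succ, List.length_set, ih]

theorem pvUpd_getD {α} (d : α) (a n : Nat) (T : Nat → α → α) (s0 : List α) (c : Nat) :
    (pvUpd d a n T s0).getD c d
    = if c % 2 = a % 2 ∧ a ≤ c ∧ (c - a) / 2 < n ∧ c < s0.length
      then T ((c - a) / 2) (s0.getD c d) else s0.getD c d := by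
  induction n generalizing c with
  | zero =>
    simp only [pvUpd, List.range_zero, List.foldl_nil]
    rw [if_neg]; omega
  | succ n ih =>
    have hmid : (pvUpd d a n T s0).getD (n * 2 + a) d = s0.getD (n * 2 + a) d := by
      rw [ih, if_neg]
      rintro ⟨-, -, hlt, -⟩
      omega
    rw [pvUpd_succ, hmid, pv_getD_set, pvUpd_len]
    by_cases hc : n * 2 + a = c ∧ n * 2 + a < s0.length
    · rw [if_pos hc, if_pos (show c % 2 = a % 2 ∧ a ≤ c ∧ (c - a) / 2 < n + 1 ∧ c < s0.length by omega)]
      rw [show (c - a) / 2 = n by omega, ← hc.1]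
    · rw [if_neg hc, ih c]
      by_cases h2 : c % 2 = a % 2 ∧ a ≤ c ∧ (c - a) / 2 < n ∧ c < s0.length
      · rw [if_pos h2, if_pos ⟨h2.1, h2.2.1, by omega, h2.2.2.2⟩]
      · rw [if_neg h2, if_neg ?_]
        rintro ⟨p, q, r, s⟩
        by_cases hlt : (c - a) / 2 < n
        · exact h2 ⟨p, q, hlt, s⟩
        · exact hc ⟨by omega, by omega⟩

theorem pv_foldl_row_factor {α β} (L : List β) (R : Nat) (body : List α → β → List α)
    (g0 : List (List α)) :
    L.foldl (fun g j => g.set R (body (g.getD R []) j)) g0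
    = g0.set R (L.foldl body (g0.getD R [])) := by
  induction L generalizing g0 with
  | nil =>
    simp only [List.foldl_nil]
    exact (pv_set_getD_self g0 R []).symm
  | cons j L ih =>
    simp only [List.foldl_cons]
    rw [ih, List.set_set, pv_getD_set]
    by_cases h : R < g0.length
    · simp [h]
    · rw [List.set_eq_of_length_le (by omega), List.set_eq_of_length_le (by omega)]

theorem pv_cond2_set_val {α} (l : List α) (m : Nat) (x d : α) (P1 P2 : Prop)
    [Decidable P1] [Decidable P2] :
    (if P2 then (if P1 then l.set m x else l).set m x else (if P1 then l.set m x else l))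
    = l.set m (if P2 then x else if P1 then x else l.getD m d) := by
  split_ifs
  · rw [List.set_set]
  · rfl
  · rfl
  · exact (pv_set_getD_self l m d).symm

theorem pv_cond2_factor {α} (g : List (List α)) (R m : Nat) (x : α) (P1 P2 : Prop)
    [Decidable P1] [Decidable P2] :
    (if P2 then
        (if P1 then g.set R ((g.getD R []).set m x) else g).set R
          (((if P1 then g.set R ((g.getD R []).set m x) else g).getD R []).set m x)
      else (if P1 then g.set R ((g.getD R []).set m x) else g))
    = g.set R (if P2 then (if P1 then (g.getD R []).set m x else g.getD R []).set m x
               else (if P1 then (g.getD R []).set m x else g.getD R [])) := by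
  split_ifs with h1 h2
  · rw [List.set_set, pv_getD_set]
    by_cases h : R < g.length
    · simp [h]
    · rw [List.set_eq_of_length_le (by omega), List.set_eq_of_length_le (by omega)]
  · rfl
  · rfl
  · exact (pv_set_getD_self g R []).symm

theorem pvCopy_eq (lines : List String) (g : List (List Char)) :
    pvCopy lines g = pvUpd [] 1 lines.length
      (fun row l => pvUpd '.' 1 (lines.getD row "").toList.length
        (fun col _ => pvGetL lines row col) l) g := by
  unfold pvCopy pvUpd
  congr 1
  funext g row
  exact pv_foldl_row_factor (List.range (lines.getD row "").toList.length) (row * 2 + 1)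
    (fun l col => l.set (col * 2 + 1) (pvGetL lines row col)) g

theorem pv_phase_eq (x : Char) (ar ac outerN : Nat) (innerN : List Char → Nat)
    (P1 P2 : Nat → Nat → Prop) [∀ i j, Decidable (P1 i j)] [∀ i j, Decidable (P2 i j)]
    (g0 : List (List Char)) :
    (List.range outerN).foldl (fun g i =>
      (List.range (innerN (g.getD (i * 2 + ar) []))).foldl (fun g j =>
        let g1 := if P1 i j then pvSet2 g (i * 2 + ar) (j * 2 + ac) x else g
        if P2 i j then pvSet2 g1 (i * 2 + ar) (j * 2 + ac) x else g1) g) g0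
    = pvUpd [] ar outerN (fun i l => pvUpd '.' ac (innerN l)
        (fun j old => if P2 i j then x else if P1 i j then x else old) l) g0 := by
  unfold pvUpd
  congr 1
  funext g i
  calc (List.range (innerN (g.getD (i * 2 + ar) []))).foldl (fun g j =>
        let g1 := if P1 i j then pvSet2 g (i * 2 + ar) (j * 2 + ac) x else g
        if P2 i j then pvSet2 g1 (i * 2 + ar) (j * 2 + ac) x else g1) g
      = (List.range (innerN (g.getD (i * 2 + ar) []))).foldl (fun g j =>
          g.set (i * 2 + ar) ((fun l j =>
            if P2 i j then (if P1 i j then l.set (j * 2 + ac) x else l).set (j * 2 + ac) x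
            else (if P1 i j then l.set (j * 2 + ac) x else l)) (g.getD (i * 2 + ar) []) j)) g := by
        congr 1
        funext g j
        exact pv_cond2_factor g (i * 2 + ar) (j * 2 + ac) x (P1 i j) (P2 i j)
    _ = g.set (i * 2 + ar) ((List.range (innerN (g.getD (i * 2 + ar) []))).foldl (fun l j =>
            if P2 i j then (if P1 i j then l.set (j * 2 + ac) x else l).set (j * 2 + ac) x
            else (if P1 i j then l.set (j * 2 + ac) x else l)) (g.getD (i * 2 + ar) [])) :=
        pv_foldl_row_factor (List.range (innerN (g.getD (i * 2 + ar) []))) (i * 2 + ar)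
          (fun l j =>
            if P2 i j then (if P1 i j then l.set (j * 2 + ac) x else l).set (j * 2 + ac) x
            else (if P1 i j then l.set (j * 2 + ac) x else l)) g
    _ = g.set (i * 2 + ar) (pvUpd '.' ac (innerN (g.getD (i * 2 + ar) []))
          (fun j old => if P2 i j then x else if P1 i j then x else old) (g.getD (i * 2 + ar) [])) := by
        congr 1
        unfold pvUpd
        congr 1
        funext l j
        exact pv_cond2_set_val l (j * 2 + ac) x '.' (P1 i j) (P2 i j)

theorem pvHoriz_eq (lines : List String) (distances : List (List Int)) (g : List (List Char)) :
    pvHoriz lines distances g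
    = pvUpd [] 1 (g.length / 2) (fun i l => pvUpd '.' 2 ((l.length - 2) / 2)
        (fun j old =>
          if pvGetD2 distances ((i * 2 + 1) / 2) ((j * 2 + 2) / 2) ≠ -1 ∧
             (pvGetL lines ((i * 2 + 1) / 2) ((j * 2 + 2) / 2) = '-' ∨
              pvGetL lines ((i * 2 + 1) / 2) ((j * 2 + 2) / 2) = 'J' ∨
              pvGetL lines ((i * 2 + 1) / 2) ((j * 2 + 2) / 2) = '7') then '-'
          else if pvGetD2 distances ((i * 2 + 1 - 1) / 2) ((j * 2 + 2 - 1) / 2) ≠ -1 ∧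
             (pvGetL lines ((i * 2 + 1 - 1) / 2) ((j * 2 + 2 - 1) / 2) = '-' ∨
              pvGetL lines ((i * 2 + 1 - 1) / 2) ((j * 2 + 2 - 1) / 2) = 'F' ∨
              pvGetL lines ((i * 2 + 1 - 1) / 2) ((j * 2 + 2 - 1) / 2) = 'L') then '-'
          else old) l) g :=
  pv_phase_eq '-' 1 2 (g.length / 2) (fun l => (l.length - 2) / 2)
    (fun i j => pvGetD2 distances ((i * 2 + 1 - 1) / 2) ((j * 2 + 2 - 1) / 2) ≠ -1 ∧
       (pvGetL lines ((i * 2 + 1 - 1) / 2) ((j * 2 + 2 - 1) / 2) = '-' ∨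
        pvGetL lines ((i * 2 + 1 - 1) / 2) ((j * 2 + 2 - 1) / 2) = 'F' ∨
        pvGetL lines ((i * 2 + 1 - 1) / 2) ((j * 2 + 2 - 1) / 2) = 'L'))
    (fun i j => pvGetD2 distances ((i * 2 + 1) / 2) ((j * 2 + 2) / 2) ≠ -1 ∧
       (pvGetL lines ((i * 2 + 1) / 2) ((j * 2 + 2) / 2) = '-' ∨
        pvGetL lines ((i * 2 + 1) / 2) ((j * 2 + 2) / 2) = 'J' ∨
        pvGetL lines ((i * 2 + 1) / 2) ((j * 2 + 2) / 2) = '7')) g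

theorem pvVert_eq (lines : List String) (distances : List (List Int)) (g : List (List Char)) :
    pvVert lines distances g
    = pvUpd [] 2 ((g.length - 2) / 2) (fun i l => pvUpd '.' 1 (l.length / 2)
        (fun j old =>
          if pvGetD2 distances ((i * 2 + 2) / 2) ((j * 2 + 1) / 2) ≠ -1 ∧
             (pvGetL lines ((i * 2 + 2) / 2) ((j * 2 + 1) / 2) = '|' ∨
              pvGetL lines ((i * 2 + 2) / 2) ((j * 2 + 1) / 2) = 'J' ∨
              pvGetL lines ((i * 2 + 2) / 2) ((j * 2 + 1) / 2) = 'L') then '|'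
          else if pvGetD2 distances ((i * 2 + 2 - 1) / 2) ((j * 2 + 1 - 1) / 2) ≠ -1 ∧
             (pvGetL lines ((i * 2 + 2 - 1) / 2) ((j * 2 + 1 - 1) / 2) = '|' ∨
              pvGetL lines ((i * 2 + 2 - 1) / 2) ((j * 2 + 1 - 1) / 2) = 'F' ∨
              pvGetL lines ((i * 2 + 2 - 1) / 2) ((j * 2 + 1 - 1) / 2) = '7') then '|'
          else old) l) g :=
  pv_phase_eq '|' 2 1 ((g.length - 2) / 2) (fun l => l.length / 2)
    (fun i j => pvGetD2 distances ((i * 2 + 2 - 1) / 2) ((j * 2 + 1 - 1) / 2) ≠ -1 ∧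
       (pvGetL lines ((i * 2 + 2 - 1) / 2) ((j * 2 + 1 - 1) / 2) = '|' ∨
        pvGetL lines ((i * 2 + 2 - 1) / 2) ((j * 2 + 1 - 1) / 2) = 'F' ∨
        pvGetL lines ((i * 2 + 2 - 1) / 2) ((j * 2 + 1 - 1) / 2) = '7'))
    (fun i j => pvGetD2 distances ((i * 2 + 2) / 2) ((j * 2 + 1) / 2) ≠ -1 ∧
       (pvGetL lines ((i * 2 + 2) / 2) ((j * 2 + 1) / 2) = '|' ∨
        pvGetL lines ((i * 2 + 2) / 2) ((j * 2 + 1) / 2) = 'J' ∨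
        pvGetL lines ((i * 2 + 2) / 2) ((j * 2 + 1) / 2) = 'L')) g

theorem pvUpd_row_len (a n : Nat) (T : Nat → List Char → List Char)
    (hT : ∀ i l, (T i l).length = l.length) (g : List (List Char)) (r : Nat) :
    ((pvUpd [] a n T g).getD r []).length = (g.getD r []).length := by
  rw [pvUpd_getD]
  split_ifs with h
  · rw [hT]
  · rfl

theorem pvInit_len (H W : Nat) : (pvInit H W).length = H * 2 + 1 := by simp [pvInit]

theorem pvInit_getD (H W r : Nat) (hr : r < H * 2 + 1) :
    (pvInit H W).getD r [] = (List.range (W * 2 + 1)).map (fun _ => '.') := by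
  rw [List.getD_eq_getElem _ _ (by rw [pvInit_len]; omega)]
  simp [pvInit]

theorem pv_dots_getD (n c : Nat) : ((List.range n).map (fun _ => '.')).getD c '.' = '.' := by
  rcases Nat.lt_or_ge c n with h | h
  · rw [List.getD_eq_getElem _ _ (by simpa using h)]
    simp
  · rw [List.getD_eq_default _ _ (by simpa using h)]

theorem pv_copy_len (lines : List String) (W : Nat) :
    (pvCopy lines (pvInit lines.length W)).length = lines.length * 2 + 1 := by
  rw [pvCopy_eq, pvUpd_len, pvInit_len]

theorem pv_copy_row_len (lines : List String) (W r : Nat) (hr : r < lines.length * 2 + 1) :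
    ((pvCopy lines (pvInit lines.length W)).getD r []).length = W * 2 + 1 := by
  rw [pvCopy_eq, pvUpd_row_len _ _ _ (fun i l => pvUpd_len _ _ _ _ l), pvInit_getD _ _ _ hr]
  simp

theorem pv_cell1 (lines : List String) (W : Nat)
    (hL : ∀ i, i < lines.length → (lines.getD i "").toList.length = W)
    (r c : Nat) (hr : r < lines.length * 2 + 1) (hc : c < W * 2 + 1) :
    ((pvCopy lines (pvInit lines.length W)).getD r []).getD c '.'
    = if r % 2 = 1 ∧ c % 2 = 1 then pvGetL lines (r / 2) (c / 2) else '.' := by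
  rw [pvCopy_eq, pvUpd_getD, pvInit_len]
  by_cases hodd : r % 2 = 1
  · rw [if_pos ⟨by omega, by omega, by omega, by omega⟩, pvInit_getD _ _ _ hr, pvUpd_getD]
    rw [hL ((r - 1) / 2) (by omega)]
    by_cases hcodd : c % 2 = 1
    · rw [if_pos ⟨by omega, by omega, by omega, by simpa using hc⟩, if_pos ⟨hodd, hcodd⟩]
      rw [show (r - 1) / 2 = r / 2 by omega, show (c - 1) / 2 = c / 2 by omega]
    · rw [if_neg (fun h => hcodd h.1), if_neg (fun h => hcodd h.2), pv_dots_getD]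
  · rw [if_neg (fun h => hodd (by omega)), if_neg (fun h => hodd h.1),
      pvInit_getD _ _ _ hr, pv_dots_getD]

theorem pv_cell2 (lines : List String) (distances : List (List Int)) (W : Nat)
    (hL : ∀ i, i < lines.length → (lines.getD i "").toList.length = W)
    (r c : Nat) (hr : r < lines.length * 2 + 1) (hc : c < W * 2 + 1) :
    ((pvHoriz lines distances (pvCopy lines (pvInit lines.length W))).getD r []).getD c '.'
    = if r % 2 = 1 ∧ c % 2 = 1 then pvGetL lines (r / 2) (c / 2)
      else if r % 2 = 1 ∧ c % 2 = 0 ∧ 0 < c ∧ c < 2 * W then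
        (if pvGetD2 distances (r / 2) (c / 2) ≠ -1 ∧
            (pvGetL lines (r / 2) (c / 2) = '-' ∨
             pvGetL lines (r / 2) (c / 2) = 'J' ∨
             pvGetL lines (r / 2) (c / 2) = '7') then '-'
         else if pvGetD2 distances (r / 2) (c / 2 - 1) ≠ -1 ∧
            (pvGetL lines (r / 2) (c / 2 - 1) = '-' ∨
             pvGetL lines (r / 2) (c / 2 - 1) = 'F' ∨
             pvGetL lines (r / 2) (c / 2 - 1) = 'L') then '-'
         else '.')
      else '.' := by
  rw [pvHoriz_eq, pvUpd_getD, pv_copy_len]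
  by_cases hodd : r % 2 = 1
  · rw [if_pos ⟨by omega, by omega, by omega, by omega⟩, pvUpd_getD, pv_copy_row_len _ _ _ hr]
    by_cases hcint : c % 2 = 0 ∧ 0 < c ∧ c < 2 * W
    · rw [if_pos ⟨by omega, by omega, by omega, by omega⟩]
      rw [pv_cell1 lines W hL r c hr hc]
      rw [show (r - 1) / 2 * 2 + 1 = r by omega]
      rw [show ((c - 2) / 2 * 2 + 2) / 2 = c / 2 by omega,
          show ((c - 2) / 2 * 2 + 2 - 1) / 2 = c / 2 - 1 by omega]
      rw [show (r - 1) / 2 = r / 2 by omega]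
      have hco : ¬(r % 2 = 1 ∧ c % 2 = 1) := by omega
      simp only [if_neg hco,
        if_pos (show r % 2 = 1 ∧ c % 2 = 0 ∧ 0 < c ∧ c < 2 * W from ⟨hodd, hcint⟩)]
    · rw [if_neg (fun h => hcint ⟨by omega, by omega, by omega⟩)]
      rw [pv_cell1 lines W hL r c hr hc]
      by_cases hcodd : c % 2 = 1
      · rw [if_pos ⟨hodd, hcodd⟩, if_pos ⟨hodd, hcodd⟩]
      · rw [if_neg (fun h => hcodd h.2), if_neg (fun h => hcodd h.2),
          if_neg (fun h => hcint ⟨h.2.1, h.2.2⟩)]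
  · rw [if_neg (fun h => hodd (by omega)), pv_cell1 lines W hL r c hr hc,
      if_neg (fun h => hodd h.1), if_neg (fun h => hodd h.1), if_neg (fun h => hodd h.1)]

theorem pv_horiz_len (lines : List String) (distances : List (List Int)) (W : Nat) :
    (pvHoriz lines distances (pvCopy lines (pvInit lines.length W))).length
    = lines.length * 2 + 1 := by
  rw [pvHoriz_eq, pvUpd_len, pv_copy_len]

theorem pv_horiz_row_len (lines : List String) (distances : List (List Int)) (W r : Nat)
    (hr : r < lines.length * 2 + 1) :
    ((pvHoriz lines distances (pvCopy lines (pvInit lines.length W))).getD r []).length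
    = W * 2 + 1 := by
  rw [pvHoriz_eq, pvUpd_row_len _ _ _ (fun i l => pvUpd_len _ _ _ _ l), pv_copy_row_len _ _ _ hr]

theorem pv_cell3 (lines : List String) (distances : List (List Int)) (W : Nat)
    (hL : ∀ i, i < lines.length → (lines.getD i "").toList.length = W)
    (r c : Nat) (hr : r < lines.length * 2 + 1) (hc : c < W * 2 + 1) :
    ((pvVert lines distances (pvHoriz lines distances
        (pvCopy lines (pvInit lines.length W)))).getD r []).getD c '.'
    = pvCellB lines distances lines.length W r c := by
  rw [pvVert_eq, pvUpd_getD, pv_horiz_len]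
  unfold pvCellB
  by_cases hre : r % 2 = 0 ∧ 0 < r ∧ r < 2 * lines.length
  · rw [if_pos ⟨by omega, by omega, by omega, by omega⟩, pvUpd_getD,
      pv_horiz_row_len lines distances W r hr]
    by_cases hcodd : c % 2 = 1
    · rw [if_pos ⟨by omega, by omega, by omega, by omega⟩,
        pv_cell2 lines distances W hL r c hr hc]
      rw [show ((r - 2) / 2 * 2 + 2) / 2 = r / 2 by omega,
          show ((c - 1) / 2 * 2 + 1) / 2 = c / 2 by omega,
          show ((r - 2) / 2 * 2 + 2 - 1) / 2 = r / 2 - 1 by omega,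
          show ((c - 1) / 2 * 2 + 1 - 1) / 2 = c / 2 by omega]
      have h1 : ¬(r % 2 = 1 ∧ c % 2 = 1) := by omega
      have h2 : ¬(r % 2 = 1 ∧ c % 2 = 0 ∧ 0 < c ∧ c < 2 * W) := by omega
      simp only [if_neg h1, if_neg h2,
        if_pos (show r % 2 = 0 ∧ 0 < r ∧ r < 2 * lines.length ∧ c % 2 = 1 from
          ⟨hre.1, hre.2.1, hre.2.2, hcodd⟩)]
      simp only [List.mem_cons, List.not_mem_nil, or_false]
      split_ifs <;> rfl
    · rw [if_neg (fun h => hcodd (by omega)),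
        pv_cell2 lines distances W hL r c hr hc]
      have h1 : ¬(r % 2 = 1 ∧ c % 2 = 1) := by omega
      have h2 : ¬(r % 2 = 1 ∧ c % 2 = 0 ∧ 0 < c ∧ c < 2 * W) := by omega
      have h3 : ¬(r % 2 = 0 ∧ 0 < r ∧ r < 2 * lines.length ∧ c % 2 = 1) := by omega
      simp only [if_neg h1, if_neg h2, if_neg h3]
  · rw [if_neg (fun h => hre ⟨by omega, by omega, by omega⟩),
      pv_cell2 lines distances W hL r c hr hc]
    by_cases h1 : r % 2 = 1 ∧ c % 2 = 1
    · rw [if_pos h1, if_pos h1]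
    · rw [if_neg h1, if_neg h1]
      by_cases h2 : r % 2 = 1 ∧ c % 2 = 0 ∧ 0 < c ∧ c < 2 * W
      · rw [if_pos h2, if_pos h2]
        simp only [List.mem_cons, List.not_mem_nil, or_false]
        split_ifs <;> rfl
      · rw [if_neg h2, if_neg h2, if_neg (fun h => hre ⟨h.1, h.2.1, h.2.2.1⟩)]

theorem pv_vert_len (lines : List String) (distances : List (List Int)) (W : Nat) :
    (pvVert lines distances (pvHoriz lines distances (pvCopy lines (pvInit lines.length W)))).length
    = lines.length * 2 + 1 := by
  rw [pvVert_eq, pvUpd_len, pv_horiz_len]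

theorem pv_vert_row_len (lines : List String) (distances : List (List Int)) (W r : Nat)
    (hr : r < lines.length * 2 + 1) :
    ((pvVert lines distances (pvHoriz lines distances
        (pvCopy lines (pvInit lines.length W)))).getD r []).length = W * 2 + 1 := by
  rw [pvVert_eq, pvUpd_row_len _ _ _ (fun i l => pvUpd_len _ _ _ _ l),
    pv_horiz_row_len lines distances W r hr]

-- A's closed form: the grid it returns is the per-cell table pvCellB
theorem pv_A_closed (lines : List String) (distances : List (List Int))
    (hrowlen : ∀ l ∈ lines, l.toList.length = (lines.headD "").toList.length) :
    expandLines lines distances = (List.range (2 * lines.length + 1)).map (pvRrow lines distances) := by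
  have hL : ∀ i, i < lines.length →
      (lines.getD i "").toList.length = (lines.headD "").toList.length := by
    intro i hi
    exact hrowlen _ (by rw [List.getD_eq_getElem _ _ hi]; exact List.getElem_mem hi)
  show (pvVert lines distances (pvHoriz lines distances
      (pvCopy lines (pvInit lines.length (lines.headD "").toList.length)))).map String.ofList
    = (List.range (2 * lines.length + 1)).map (pvRrow lines distances)
  apply List.ext_getElem
  · rw [List.length_map, pv_vert_len, List.length_map, List.length_range]
    omega
  · intro r h1 h2
    rw [List.length_map, pv_vert_len] at h1
    rw [List.getElem_map, List.getElem_map, List.getElem_range]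
    unfold pvRrow
    congr 1
    rw [← List.getD_eq_getElem _ [] (by rw [pv_vert_len]; omega)]
    apply List.ext_getElem
    · rw [pv_vert_row_len lines distances _ r (by omega), List.length_map, List.length_range]
      omega
    · intro c hc1 hc2
      rw [pv_vert_row_len lines distances _ r (by omega)] at hc1
      rw [List.getElem_map, List.getElem_range,
        ← List.getD_eq_getElem _ '.' (by rw [pv_vert_row_len lines distances _ r (by omega)]; omega)]
      exact pv_cell3 lines distances _ hL r c (by omega) (by omega)

-- ===== B-side lemmas =====

-- a dot followed by n two-element blocks, as a map over the 2n+1 output columns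
theorem pv_pairFlat (f g : Nat → Char) (n : Nat) :
    '.' :: (List.range n).flatMap (fun c => [f c, g c])
    = (List.range (2 * n + 1)).map
        (fun k => if k = 0 then '.' else if k % 2 = 1 then f (k / 2) else g (k / 2 - 1)) := by
  induction n with
  | zero => rfl
  | succ n ih =>
    have e1 : 2 * (n + 1) + 1 = (2 * n + 1) + 1 + 1 := by ring
    rw [List.range_succ (n := n), List.flatMap_append, ← List.cons_append, ih, e1,
        List.range_succ (n := 2 * n + 1 + 1), List.range_succ (n := 2 * n + 1),
        List.map_append, List.map_append, List.append_assoc]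
    congr 1
    simp only [List.map_cons, List.map_nil, List.flatMap_cons, List.flatMap_nil]
    rw [if_neg (by omega : ¬(2 * n + 1 = 0)), if_pos (by omega : (2 * n + 1) % 2 = 1),
        if_neg (by omega : ¬(2 * n + 1 + 1 = 0)), if_neg (by omega : ¬((2 * n + 1 + 1) % 2 = 1))]
    rw [show (2 * n + 1) / 2 = n by omega, show (2 * n + 1 + 1) / 2 - 1 = n by omega]
    rfl

theorem pv_cellRowB_closed (lines : List String) (distances : List (List Int))
    (hL : ∀ i, i < lines.length → (lines.getD i "").toList.length = (lines.headD "").toList.length)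
    (i : Nat) (hi : i < lines.length) :
    pvCellRowB (lines.getD i "").toList (distances.getD i [])
    = (List.range (2 * (lines.headD "").toList.length + 1)).map
        (fun c => pvCellB lines distances lines.length (lines.headD "").toList.length (2 * i + 1) c) := by
  unfold pvCellRowB
  rw [PySem.List.foldl_append_eq_flatMap, List.singleton_append, hL i hi, pv_pairFlat]
  apply List.map_congr_left
  intro k hk
  rw [List.mem_range] at hk
  unfold pvCellB
  have hro : (2 * i + 1) % 2 = 1 := by omega
  have hrd : (2 * i + 1) / 2 = i := by omega
  by_cases hk0 : k = 0
  · subst hk0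
    rw [if_pos rfl, if_neg (by omega), if_neg (by omega), if_neg (by omega)]
  · rw [if_neg hk0]
    by_cases hko : k % 2 = 1
    · rw [if_pos hko, if_pos ⟨hro, hko⟩, hrd]
      rfl
    · rw [if_neg hko]
      by_cases hklt : k < 2 * (lines.headD "").toList.length
      · rw [if_pos (show k / 2 - 1 + 1 < (lines.headD "").toList.length by omega),
            if_neg (show ¬((2 * i + 1) % 2 = 1 ∧ k % 2 = 1) by omega),
            if_pos (show (2 * i + 1) % 2 = 1 ∧ k % 2 = 0 ∧ 0 < k ∧
              k < 2 * (lines.headD "").toList.length by omega),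
            hrd, show k / 2 - 1 + 1 = k / 2 by omega]
        simp only [pvHconn, pvGetL, pvGetD2]
        split_ifs <;> first | rfl | tauto
      · rw [if_neg (show ¬(k / 2 - 1 + 1 < (lines.headD "").toList.length) by omega),
            if_neg (show ¬((2 * i + 1) % 2 = 1 ∧ k % 2 = 1) by omega),
            if_neg (show ¬((2 * i + 1) % 2 = 1 ∧ k % 2 = 0 ∧ 0 < k ∧
              k < 2 * (lines.headD "").toList.length) by omega),
            if_neg (show ¬((2 * i + 1) % 2 = 0 ∧ 0 < 2 * i + 1 ∧
              2 * i + 1 < 2 * lines.length ∧ k % 2 = 1) by omega)]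

theorem pv_sepRowB_closed (lines : List String) (distances : List (List Int))
    (hL : ∀ i, i < lines.length → (lines.getD i "").toList.length = (lines.headD "").toList.length)
    (r0 : Nat) (h1 : 1 ≤ r0) (h2 : r0 < lines.length) :
    pvSepRowB (lines.getD (r0 - 1) "").toList (lines.getD r0 "").toList
        (distances.getD (r0 - 1) []) (distances.getD r0 [])
    = (List.range (2 * (lines.headD "").toList.length + 1)).map
        (fun c => pvCellB lines distances lines.length (lines.headD "").toList.length (2 * r0) c) := by
  unfold pvSepRowB
  rw [List.singleton_append, hL r0 h2, pv_pairFlat]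
  apply List.map_congr_left
  intro k hk
  rw [List.mem_range] at hk
  unfold pvCellB
  have hre : (2 * r0) % 2 = 0 := by omega
  have hrd : (2 * r0) / 2 = r0 := by omega
  by_cases hk0 : k = 0
  · subst hk0
    rw [if_pos rfl, if_neg (by omega), if_neg (by omega), if_neg (by omega)]
  · rw [if_neg hk0]
    by_cases hko : k % 2 = 1
    · rw [if_pos hko,
          if_neg (show ¬((2 * r0) % 2 = 1 ∧ k % 2 = 1) by omega),
          if_neg (show ¬((2 * r0) % 2 = 1 ∧ k % 2 = 0 ∧ 0 < k ∧
            k < 2 * (lines.headD "").toList.length) by omega),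
          if_pos (show (2 * r0) % 2 = 0 ∧ 0 < 2 * r0 ∧
            2 * r0 < 2 * lines.length ∧ k % 2 = 1 by omega), hrd]
      simp only [pvVconn, pvGetL, pvGetD2]
      split_ifs <;> first | rfl | tauto
    · rw [if_neg hko,
          if_neg (show ¬((2 * r0) % 2 = 1 ∧ k % 2 = 1) by omega),
          if_neg (show ¬((2 * r0) % 2 = 1 ∧ k % 2 = 0 ∧ 0 < k ∧
            k < 2 * (lines.headD "").toList.length) by omega),
          if_neg (show ¬((2 * r0) % 2 = 0 ∧ 0 < 2 * r0 ∧
            2 * r0 < 2 * lines.length ∧ k % 2 = 1) by omega)]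

theorem pv_dotsRow0 (lines : List String) (distances : List (List Int)) :
    String.ofList (List.replicate (2 * (lines.headD "").toList.length + 1) '.')
    = pvRrow lines distances 0 := by
  unfold pvRrow
  congr 1
  rw [show (List.range (2 * (lines.headD "").toList.length + 1)).map
        (fun c => pvCellB lines distances lines.length (lines.headD "").toList.length 0 c)
      = (List.range (2 * (lines.headD "").toList.length + 1)).map (fun _ => '.') from
    List.map_congr_left (fun c _ => by
      unfold pvCellB
      rw [if_neg (by omega), if_neg (by omega), if_neg (by omega)])]
  rw [List.map_const', List.length_range]

theorem pv_dotsRowLast (lines : List String) (distances : List (List Int)) :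
    String.ofList (List.replicate (2 * (lines.headD "").toList.length + 1) '.')
    = pvRrow lines distances (2 * lines.length) := by
  unfold pvRrow
  congr 1
  rw [show (List.range (2 * (lines.headD "").toList.length + 1)).map
        (fun c => pvCellB lines distances lines.length (lines.headD "").toList.length (2 * lines.length) c)
      = (List.range (2 * (lines.headD "").toList.length + 1)).map (fun _ => '.') from
    List.map_congr_left (fun c _ => by
      unfold pvCellB
      rw [if_neg (by omega), if_neg (by omega), if_neg (by omega)])]
  rw [List.map_const', List.length_range]

-- B's row loop, characterised: after n ≥ 1 steps it has emitted rows 0 … 2n-1 of the table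
theorem pv_body_closed (lines : List String) (distances : List (List Int))
    (hL : ∀ i, i < lines.length → (lines.getD i "").toList.length = (lines.headD "").toList.length)
    (n : Nat) (h1 : 1 ≤ n) (hn : n ≤ lines.length) :
    (List.range n).foldl (fun out r =>
      (if 0 < r then
         out ++ [String.ofList (pvSepRowB (lines.getD (r - 1) "").toList (lines.getD r "").toList
                   (distances.getD (r - 1) []) (distances.getD r []))]
       else out) ++
      [String.ofList (pvCellRowB (lines.getD r "").toList (distances.getD r []))])
      [String.ofList (List.replicate (2 * (lines.headD "").toList.length + 1) '.')]
    = (List.range (2 * n)).map (pvRrow lines distances) := by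
  induction n with
  | zero => omega
  | succ n ih =>
    rcases Nat.eq_zero_or_pos n with hz | hp
    · subst hz
      rw [show List.range 1 = [0] from rfl, List.foldl_cons, List.foldl_nil,
          if_neg (by omega : ¬ (0 : Nat) < 0)]
      rw [pv_dotsRow0 lines distances, pv_cellRowB_closed lines distances hL 0 (by omega)]
      rw [show List.range (2 * 1) = [0, 1] from rfl]
      simp only [pvRrow, List.map_cons, List.map_nil]
      norm_num
    · rw [List.range_succ, List.foldl_append, List.foldl_cons, List.foldl_nil,
          ih hp (by omega), if_pos hp]
      rw [pv_cellRowB_closed lines distances hL n (by omega),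
          pv_sepRowB_closed lines distances hL n hp (by omega)]
      rw [show 2 * (n + 1) = (2 * n + 1) + 1 by ring, List.range_succ (n := 2 * n + 1),
          List.range_succ (n := 2 * n),
          List.map_append, List.map_append, List.append_assoc]
      simp only [pvRrow, List.map_cons, List.map_nil, List.append_assoc,
        List.cons_append, List.nil_append]

theorem pv_main_eq (lines : List String) (distances : List (List Int))
    (hne : lines ≠ [])
    (hrowlen : ∀ l ∈ lines, l.toList.length = (lines.headD "").toList.length) :
    expandLines lines distances = expandLines_alt lines distances := by
  have hL : ∀ i, i < lines.length →
      (lines.getD i "").toList.length = (lines.headD "").toList.length := by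
    intro i hi
    exact hrowlen _ (by rw [List.getD_eq_getElem _ _ hi]; exact List.getElem_mem hi)
  have hH : 1 ≤ lines.length := by
    cases lines with
    | nil => exact absurd rfl hne
    | cons a l => simp
  rw [pv_A_closed lines distances hrowlen]
  show _ = _ ++ _
  rw [pv_body_closed lines distances hL lines.length hH (le_refl _),
      pv_dotsRowLast lines distances,
      show 2 * lines.length + 1 = (2 * lines.length) + 1 by rfl, List.range_succ,
      List.map_append]
  rfl

-- ===== VERDICT (by name: the statement is the Claim_ definition above) =====
theorem expandLines_spec : Claim_equal_expandLines := by
  intro lines distances _ hpre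
  exact pv_main_eq lines distances hpre.1 hpre.2.1
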